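-- pv_equiv track=rewrite | github.com/NikoSoder/DSA-2024 | week_3/samebit.py | count
-- ===== SOURCE A (Python) =====
-- def count(bits):
--     n = len(bits)
--     result = 0
--     zeros = 0
--     ones = 0
--     result_ones = 0
--     for i in range(n):
--         # 0
--         if bits[i] == "0" and i == 0:
--             zeros += 1
--             continue
--         if bits[i] == "0":
--             result += zeros
--             zeros += 1
--         # 1
--         if bits[i] == "1" and i == 0:
--             ones += 1
--             continue
--         if bits[i] == "1":
--             result_ones += ones
--             ones += 1
--     return result + result_ones
-- ===== SOURCE B (Python) =====
-- def count(bits):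
--     z = bits.count("0")
--     o = bits.count("1")
--     return z * (z - 1) // 2 + o * (o - 1) // 2
-- ===== Notes on version B (the rewrite author's own statement) =====
-- stated objective: simpler
-- what changed: Replaces the per-position loop accumulating running zero/one counts with the closed-form pair count C(z,2)+C(o,2) computed from the two character counts.
import Mathlib
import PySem

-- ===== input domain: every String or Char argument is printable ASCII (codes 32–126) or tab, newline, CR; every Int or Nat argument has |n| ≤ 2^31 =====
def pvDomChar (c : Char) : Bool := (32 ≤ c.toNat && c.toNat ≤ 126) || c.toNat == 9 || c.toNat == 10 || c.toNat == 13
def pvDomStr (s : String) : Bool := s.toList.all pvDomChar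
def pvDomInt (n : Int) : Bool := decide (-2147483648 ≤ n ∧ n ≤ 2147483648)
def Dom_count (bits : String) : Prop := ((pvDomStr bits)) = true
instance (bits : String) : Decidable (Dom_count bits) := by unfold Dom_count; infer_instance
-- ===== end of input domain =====

-- B replaces A's per-position loop with the closed form C(z,2)+C(o,2) over the two character counts (simpler).

-- ===== PORT A =====
-- one loop iteration of A: state is (result, zeros, ones, result_ones), input (i, bits[i])
def countStep (st : Int × Int × Int × Int) (p : Int × Char) : Int × Int × Int × Int :=
  let (result, zeros, ones, result_ones) := st
  let (i, c) := p
  if c = '0' ∧ i = 0 then (result, zeros + 1, ones, result_ones)   -- continue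
  else
    let rz : Int × Int := if c = '0' then (result + zeros, zeros + 1) else (result, zeros)
    if c = '1' ∧ i = 0 then (rz.1, rz.2, ones + 1, result_ones)    -- continue
    else
      let ro : Int × Int := if c = '1' then (result_ones + ones, ones + 1) else (result_ones, ones)
      (rz.1, rz.2, ro.2, ro.1)

def count (bits : String) : Int :=
  let st := (PySem.List.enumerate bits.toList 0).foldl countStep (0, 0, 0, 0)
  st.1 + st.2.2.2

-- ===== PORT B =====
def count_alt (bits : String) : Int :=
  let z : Int := (PySem.Str.count bits "0" : Int)
  let o : Int := (PySem.Str.count bits "1" : Int)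
  PySem.Int.floordiv (z * (z - 1)) 2 + PySem.Int.floordiv (o * (o - 1)) 2

-- ===== PRECONDITION & SPEC =====
def Spec_count (bits : String) (out : Int) : Prop := out = count_alt bits
instance (bits : String) (out : Int) : Decidable (Spec_count bits out) := by unfold Spec_count; infer_instance

-- ===== CLAIM (what is proved, stated in full; the proofs are below) =====
def Claim_equal_count : Prop := ∀ (bits : String), Dom_count bits → Spec_count bits (count bits)

-- ===== LEMMAS AND PROOFS =====

-- triangle numbers
def tri : Nat → Nat
  | 0 => 0
  | n + 1 => tri n + n

theorem tri_succ_two_mul (n : Nat) : 2 * tri (n + 1) = (n + 1) * n := by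
  induction n with
  | zero => rfl
  | succ m ih =>
      calc 2 * tri (m + 1 + 1) = 2 * tri (m + 1) + 2 * (m + 1) := by simp only [tri]; ring
        _ = (m + 1) * m + 2 * (m + 1) := by rw [ih]
        _ = (m + 1 + 1) * (m + 1) := by ring

theorem tri_two_mul (n : Nat) : 2 * tri n = n * (n - 1) := by
  cases n with
  | zero => rfl
  | succ m => simpa using tri_succ_two_mul m

-- the step, on an index known to be nonzero, ignores the index
def countStep' (st : Int × Int × Int × Int) (c : Char) : Int × Int × Int × Int :=
  if c = '0' then (st.1 + st.2.1, st.2.1 + 1, st.2.2.1, st.2.2.2)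
  else if c = '1' then (st.1, st.2.1, st.2.2.1 + 1, st.2.2.2 + st.2.2.1)
  else st

theorem countStep_of_ne_zero (st : Int × Int × Int × Int) (i : Int) (c : Char) (hi : i ≠ 0) :
    countStep st (i, c) = countStep' st c := by
  obtain ⟨r, z, o, ro⟩ := st
  simp only [countStep, countStep', hi]
  by_cases h0 : c = '0' <;> by_cases h1 : c = '1' <;> simp_all

theorem foldl_enumerate_pos (l : List Char) (s : Int) (hs : 1 ≤ s) (st : Int × Int × Int × Int) :
    (PySem.List.enumerate l s).foldl countStep st = l.foldl countStep' st := by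
  induction l generalizing s st with
  | nil => simp [PySem.List.enumerate_nil]
  | cons c t ih =>
      rw [PySem.List.enumerate_cons, List.foldl_cons, List.foldl_cons,
        countStep_of_ne_zero st s c (by omega)]
      exact ih (s + 1) (by omega) _

theorem foldl_countStep' (l : List Char) (r z o ro : Int) :
    l.foldl countStep' (r, z, o, ro) =
      (r + z * (l.count '0' : Int) + (tri (l.count '0') : Int),
       z + (l.count '0' : Int),
       o + (l.count '1' : Int),
       ro + o * (l.count '1' : Int) + (tri (l.count '1') : Int)) := by
  induction l generalizing r z o ro with
  | nil => simp [tri]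
  | cons c t ih =>
      rw [List.foldl_cons]
      by_cases h0 : c = '0'
      · subst h0
        have hs : countStep' (r, z, o, ro) '0' = (r + z, z + 1, o, ro) := by
          simp [countStep']
        have h1 : ('0' :: t).count '0' = t.count '0' + 1 := by simp
        have h2 : ('0' :: t).count '1' = t.count '1' := by simp
        rw [hs, ih, h1, h2]
        refine Prod.ext ?_ (Prod.ext ?_ (Prod.ext ?_ ?_)) <;> simp [tri] <;> ring
      · by_cases h1 : c = '1'
        · subst h1
          have hs : countStep' (r, z, o, ro) '1' = (r, z, o + 1, ro + o) := by
            simp [countStep']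
          have h2 : ('1' :: t).count '0' = t.count '0' := by simp
          have h3 : ('1' :: t).count '1' = t.count '1' + 1 := by simp
          rw [hs, ih, h2, h3]
          refine Prod.ext ?_ (Prod.ext ?_ (Prod.ext ?_ ?_)) <;> simp [tri] <;> ring
        · have hs : countStep' (r, z, o, ro) c = (r, z, o, ro) := by
            simp [countStep', h0, h1]
          have h2 : (c :: t).count '0' = t.count '0' := by
            simp [List.count_cons, beq_eq_false_iff_ne.mpr h0]
          have h3 : (c :: t).count '1' = t.count '1' := by
            simp [List.count_cons, beq_eq_false_iff_ne.mpr h1]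
          rw [hs, ih, h2, h3]

-- single-character substring count is List.count
theorem go_singleton (c : Char) (fuel : Nat) (l : List Char) (acc : Nat)
    (h : l.length ≤ fuel) : PySem.Chars.count.go [c] fuel l acc = acc + l.count c := by
  induction fuel generalizing l acc with
  | zero =>
      have : l = [] := List.eq_nil_of_length_eq_zero (by omega)
      subst this; simp [PySem.Chars.count.go]
  | succ f ih =>
      cases l with
      | nil => simp [PySem.Chars.count.go]
      | cons h' t =>
          rw [PySem.Chars.count.go]
          by_cases hc : c = h'
          · subst hc
            have hp : List.isPrefixOf [c] (c :: t) = true := by simp [List.isPrefixOf]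
            simp only [hp, if_pos]
            rw [show List.drop (List.length [c]) (c :: t) = t by simp]
            rw [ih t (acc + 1) (by simp at h; omega)]
            simp
            omega
          · have hbe : (c == h') = false := beq_eq_false_iff_ne.mpr hc
            have hp : List.isPrefixOf [c] (h' :: t) = false := by
              simp [List.isPrefixOf, hbe]
            simp only [hp, Bool.false_eq_true, if_false]
            rw [ih t acc (by simp at h; omega)]
            have hbe' : (h' == c) = false := beq_eq_false_iff_ne.mpr (fun hh => hc hh.symm)
            simp [List.count_cons, hbe']

theorem chars_count_singleton (c : Char) (l : List Char) :
    PySem.Chars.count l [c] = l.count c := by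
  simp only [PySem.Chars.count, List.isEmpty_cons, Bool.false_eq_true, if_false]
  simpa using go_singleton c l.length l 0 (le_refl _)

theorem floordiv_tri (n : Nat) :
    PySem.Int.floordiv ((n : Int) * ((n : Int) - 1)) 2 = (tri n : Int) := by
  have hcast : (n : Int) * ((n : Int) - 1) = ((n * (n - 1) : Nat) : Int) := by
    cases n with
    | zero => simp
    | succ m => push_cast; ring
  rw [hcast, PySem.Int.floordiv_eq_ediv_of_pos (by norm_num)]
  have := tri_two_mul n
  omega

-- ===== VERDICT (by name: the statement is the Claim_ definition above) =====
theorem count_spec : Claim_equal_count := by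
  intro bits _
  unfold Spec_count
  have hz : PySem.Str.count bits "0" = bits.toList.count '0' := by
    rw [PySem.Str.count_eq]
    exact chars_count_singleton '0' bits.toList
  have ho : PySem.Str.count bits "1" = bits.toList.count '1' := by
    rw [PySem.Str.count_eq]
    exact chars_count_singleton '1' bits.toList
  simp only [count, count_alt, hz, ho, floordiv_tri]
  cases hl : bits.toList with
  | nil => simp [PySem.List.enumerate_nil, tri]
  | cons c t =>
      rw [PySem.List.enumerate_cons, List.foldl_cons]
      have hrest : (PySem.List.enumerate t (0 + 1)).foldl countStep (countStep (0,0,0,0) (0,c)) =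
          t.foldl countStep' (countStep (0,0,0,0) (0,c)) :=
        foldl_enumerate_pos t (0 + 1) (by omega) _
      rw [hrest]
      by_cases h0 : c = '0'
      · subst h0
        have : countStep (0,0,0,0) ((0 : Int), '0') = (0, 1, 0, 0) := by decide
        rw [this, foldl_countStep']
        simp [tri]
        ring
      · by_cases h1 : c = '1'
        · subst h1
          have : countStep (0,0,0,0) ((0 : Int), '1') = (0, 0, 1, 0) := by decide
          rw [this, foldl_countStep']
          simp [tri, h0]
          ring
        · have : countStep (0,0,0,0) ((0 : Int), c) = (0, 0, 0, 0) := by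
            simp [countStep, h0, h1]
          rw [this, foldl_countStep']
          have e0 : (c == '0') = false := by simpa using h0
          have e1 : (c == '1') = false := by simpa using h1
          simp [List.count_cons, e0, e1]
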